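-- pv_equiv track=rewrite | github.com/xiaoguo1224/tkclaw | claw-buddy-backend/app/services/workspace_service.py | _spiral_next
-- ===== SOURCE A (Python) =====
-- def _spiral_next(index: int) -> tuple[int, int]:
--     """Return the hex position for the Nth agent (0-indexed) using spiral layout."""
--     if index == 0:
--         return (1, 0)
--     positions: list[tuple[int, int]] = []
--     q, r, ring = 1, 0, 1
--     directions = [(0, -1), (-1, 0), (-1, 1), (0, 1), (1, 0), (1, -1)]
--     while len(positions) <= index:
--         for dq, dr in directions:
--             for _ in range(ring):
--                 if len(positions) > index:
--                     break
--                 positions.append((q, r))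
--                 q += dq
--                 r += dr
--         ring += 1
--         q += 1
--     return positions[index]
-- ===== SOURCE B (Python) =====
-- def _spiral_next(index: int) -> tuple[int, int]:
--     """O(sqrt(index)) hex spiral position: find the ring, then compute the cell directly."""
--     k = 1
--     while 3 * k * (k + 1) <= index:
--         k += 1
--     j = index - 3 * k * (k - 1)
--     leg, step = divmod(j, k)
--     CQ = (0, 0, -1, -2, -2, -1)
--     CR = (0, -1, -1, 0, 1, 1)
--     DQ = (0, -1, -1, 0, 1, 1)
--     DR = (-1, 0, 1, 1, 0, -1)
--     return (k + k * CQ[leg] + step * DQ[leg], k * CR[leg] + step * DR[leg])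
-- ===== Notes on version B (the rewrite author's own statement) =====
-- stated objective: faster
-- what changed: Instead of simulating the spiral cell by cell and storing all index+1 positions, B finds the ring k with 3k(k-1) <= index < 3k(k+1) by an O(sqrt(index)) increment loop and computes the cell from the in-ring offset with a constant-time leg/step table formula.
import Mathlib
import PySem

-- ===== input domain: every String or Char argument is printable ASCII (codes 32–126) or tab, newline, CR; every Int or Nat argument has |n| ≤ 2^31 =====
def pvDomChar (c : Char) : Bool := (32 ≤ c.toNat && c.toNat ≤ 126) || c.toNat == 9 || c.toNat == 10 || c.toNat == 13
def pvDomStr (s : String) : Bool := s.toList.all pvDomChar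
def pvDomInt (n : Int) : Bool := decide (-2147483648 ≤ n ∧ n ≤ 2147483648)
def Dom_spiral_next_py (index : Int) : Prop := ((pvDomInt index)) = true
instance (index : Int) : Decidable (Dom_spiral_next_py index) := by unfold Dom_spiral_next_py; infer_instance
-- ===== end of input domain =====

-- B replaces A's O(index) cell-by-cell spiral simulation by an O(sqrt(index)) ring search
-- plus a direct in-ring offset formula.

-- ===== PORT A =====
-- directions = [(0,-1),(-1,0),(-1,1),(0,1),(1,0),(1,-1)]
def pvDirections : List (Int × Int) := [(0, -1), (-1, 0), (-1, 1), (0, 1), (1, 0), (1, -1)]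

-- inner 'for _ in range(ring)' loop (with the 'if len(positions) > index: break' check)
def pvLeg (index : Int) (dq dr : Int) : Nat → List (Int × Int) × Int × Int → List (Int × Int) × Int × Int
  | 0, s => s
  | n + 1, (pos, q, r) =>
      if (pos.length : Int) > index then (pos, q, r)
      else pvLeg index dq dr n (pos ++ [(q, r)], q + dq, r + dr)

-- 'for dq, dr in directions' loop
def pvSweep (index : Int) (ring : Int) (s : List (Int × Int) × Int × Int) : List (Int × Int) × Int × Int :=
  pvDirections.foldl (fun s d => pvLeg index d.1 d.2 ring.toNat s) s

-- 'while len(positions) <= index' loop; the fuel (index.toNat + 1) only makes it total: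
-- every iteration appends at least one cell, so at most index + 1 iterations ever run.
def pvLoop (index : Int) : Nat → List (Int × Int) × Int × Int × Int → List (Int × Int)
  | 0, (pos, _, _, _) => pos
  | f + 1, (pos, q, r, ring) =>
      if (pos.length : Int) ≤ index then
        match pvSweep index ring (pos, q, r) with
        | (pos', q', r') => pvLoop index f (pos', q' + 1, r', ring + 1)
      else pos

def spiral_next_py (index : Int) : List Int :=
  if index = 0 then [1, 0]
  else
    let positions := pvLoop index (index.toNat + 1) ([], 1, 0, 1)
    match PySem.List.pyGet? positions index with  -- positions[index]; none = IndexError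
    | some (q, r) => [q, r]
    | none => []

-- ===== PORT B =====
-- 'while 3 * k * (k + 1) <= index: k += 1'; the fuel (index.toNat + 1) only makes it total.
def pvFindRing (index : Int) : Nat → Int → Int
  | 0, k => k
  | f + 1, k => if 3 * k * (k + 1) ≤ index then pvFindRing index f (k + 1) else k

def pvCQ : List Int := [0, 0, -1, -2, -2, -1]
def pvCR : List Int := [0, -1, -1, 0, 1, 1]
def pvDQ : List Int := [0, -1, -1, 0, 1, 1]
def pvDR : List Int := [-1, 0, 1, 1, 0, -1]

def spiral_next_py_alt (index : Int) : List Int :=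
  let k := pvFindRing index (index.toNat + 1) 1
  let j := index - 3 * k * (k - 1)
  let leg := PySem.Int.floordiv j k
  let step := PySem.Int.mod j k
  match PySem.List.pyGet? pvCQ leg, PySem.List.pyGet? pvCR leg,
        PySem.List.pyGet? pvDQ leg, PySem.List.pyGet? pvDR leg with
  | some cq, some cr, some dqv, some drv =>
      [k + k * cq + step * dqv, k * cr + step * drv]
  | _, _, _, _ => []

-- ===== PRECONDITION & SPEC =====
-- Pre_ excludes index < 0, where A raises IndexError (positions[index] on an empty list).
def Pre_spiral_next_py (index : Int) : Prop := 0 ≤ index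
instance (index : Int) : Decidable (Pre_spiral_next_py index) := by unfold Pre_spiral_next_py; infer_instance
def pvWitness_spiral_next_py : Int := (7)

def Spec_spiral_next_py (index : Int) (out : List Int) : Prop := out = spiral_next_py_alt index
instance (index : Int) (out : List Int) : Decidable (Spec_spiral_next_py index out) := by unfold Spec_spiral_next_py; infer_instance

-- ===== CLAIM (what is proved, stated in full; the proofs are below) =====
def Claim_equal_spiral_next_py : Prop := ∀ (index : Int), Dom_spiral_next_py index → Pre_spiral_next_py index → Spec_spiral_next_py index (spiral_next_py index)

-- ===== LEMMAS AND PROOFS =====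

-- abstract spiral: one straight leg of cells
def pvLegCells (q r dq dr : Int) : Nat → List (Int × Int)
  | 0 => []
  | n + 1 => (q, r) :: pvLegCells (q + dq) (r + dr) dq dr n

-- cells of several legs (each of length n) threaded from (q, r)
def pvMultiCells (q r : Int) (n : Nat) : List (Int × Int) → List (Int × Int)
  | [] => []
  | (dq, dr) :: ds => pvLegCells q r dq dr n ++ pvMultiCells (q + n * dq) (r + n * dr) n ds

def pvEndQ (q : Int) (n : Nat) : List (Int × Int) → Int
  | [] => q
  | (dq, _) :: ds => pvEndQ (q + n * dq) n ds

def pvEndR (r : Int) (n : Nat) : List (Int × Int) → Int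
  | [] => r
  | (_, dr) :: ds => pvEndR (r + n * dr) n ds

def pvRing (k : Int) : List (Int × Int) := pvMultiCells k 0 k.toNat pvDirections

-- rings k, k+1, …, k+m-1 concatenated
def pvRings (k : Int) : Nat → List (Int × Int)
  | 0 => []
  | m + 1 => pvRing k ++ pvRings (k + 1) m

def pvFold (index : Int) (n : Nat) (ds : List (Int × Int))
    (s : List (Int × Int) × Int × Int) : List (Int × Int) × Int × Int :=
  ds.foldl (fun s d => pvLeg index d.1 d.2 n s) s

theorem pvLegCells_length (q r dq dr : Int) (n : Nat) :
    (pvLegCells q r dq dr n).length = n := by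
  induction n generalizing q r with
  | zero => rfl
  | succ n ih => simp [pvLegCells, ih]

theorem pvMultiCells_length (n : Nat) (ds : List (Int × Int)) : ∀ (q r : Int),
    (pvMultiCells q r n ds).length = ds.length * n := by
  induction ds with
  | nil => intro q r; simp [pvMultiCells]
  | cons d ds ih =>
    intro q r
    obtain ⟨dq, dr⟩ := d
    simp [pvMultiCells, pvLegCells_length, ih]
    try ring

theorem pvRing_length (k : Int) : (pvRing k).length = 6 * k.toNat := by
  simp [pvRing, pvMultiCells_length, pvDirections]; try ring

theorem pvLegCells_get (q r dq dr : Int) (n i : Nat) (h : i < n) :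
    (pvLegCells q r dq dr n)[i]? = some (q + i * dq, r + i * dr) := by
  induction n generalizing q r i with
  | zero => omega
  | succ n ih =>
    cases i with
    | zero => simp [pvLegCells]
    | succ i =>
      have := ih (q + dq) (r + dr) i (by omega)
      simp [pvLegCells, this]
      constructor <;> push_cast <;> ring

theorem pvLoop_stuck (index : Int) (fuel : Nat) (pos : List (Int × Int)) (q r ring : Int)
    (h : (pos.length : Int) > index) : pvLoop index fuel (pos, q, r, ring) = pos := by
  cases fuel with
  | zero => rfl
  | succ f => simp [pvLoop]; omega

theorem pvLeg_stuck (index dq dr : Int) (n : Nat) (pos : List (Int × Int)) (q r : Int)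
    (h : (pos.length : Int) > index) : pvLeg index dq dr n (pos, q, r) = (pos, q, r) := by
  cases n with
  | zero => rfl
  | succ n => simp [pvLeg, h]

theorem pvLeg_full (index dq dr : Int) (n : Nat) (pos : List (Int × Int)) (q r : Int)
    (h : (pos.length : Int) + n ≤ index + 1) :
    pvLeg index dq dr n (pos, q, r) =
      (pos ++ pvLegCells q r dq dr n, q + n * dq, r + n * dr) := by
  induction n generalizing pos q r with
  | zero => simp [pvLeg, pvLegCells]
  | succ n ih =>
    have hle : ¬ ((pos.length : Int) > index) := by push_cast at h; omega
    have := ih (pos ++ [(q, r)]) (q + dq) (r + dr) (by simp; push_cast at h ⊢; omega)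
    simp only [pvLeg, if_neg hle, this, List.append_assoc]
    simp [pvLegCells]
    constructor <;> push_cast <;> ring

theorem pvLeg_partial (index dq dr : Int) (n : Nat) (pos : List (Int × Int)) (q r : Int)
    (h : (pos.length : Int) ≤ index + 1) :
    ∃ q' r', pvLeg index dq dr n (pos, q, r) =
      (pos ++ (pvLegCells q r dq dr n).take ((index + 1 - pos.length).toNat), q', r') := by
  induction n generalizing pos q r with
  | zero => exact ⟨q, r, by simp [pvLeg, pvLegCells]⟩
  | succ n ih =>
    by_cases hgt : (pos.length : Int) > index
    · refine ⟨q, r, ?_⟩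
      have ht : (index + 1 - (pos.length : Int)).toNat = 0 := by omega
      simp [pvLeg, hgt, ht]
    · have hlen : ((pos ++ [(q, r)]).length : Int) ≤ index + 1 := by simp; omega
      obtain ⟨q', r', hrec⟩ := ih (pos ++ [(q, r)]) (q + dq) (r + dr) hlen
      refine ⟨q', r', ?_⟩
      simp only [pvLeg, if_neg hgt, hrec]
      have ht : (index + 1 - (pos.length : Int)).toNat
          = ((index + 1 - ((pos ++ [(q, r)]).length : Int)).toNat) + 1 := by simp; omega
      simp [ht, pvLegCells, List.append_assoc]

theorem pvFold_stuck (index : Int) (n : Nat) (ds : List (Int × Int))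
    (pos : List (Int × Int)) (q r : Int) (h : (pos.length : Int) > index) :
    pvFold index n ds (pos, q, r) = (pos, q, r) := by
  induction ds generalizing q r with
  | nil => rfl
  | cons d ds ih =>
    simp only [pvFold, List.foldl_cons, pvLeg_stuck index d.1 d.2 n pos q r h]
    exact ih q r

theorem pvFold_full (index : Int) (n : Nat) (ds : List (Int × Int)) :
    ∀ (pos : List (Int × Int)) (q r : Int),
    (pos.length : Int) + n * ds.length ≤ index + 1 →
    pvFold index n ds (pos, q, r) =
      (pos ++ pvMultiCells q r n ds, pvEndQ q n ds, pvEndR r n ds) := by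
  induction ds with
  | nil => intro pos q r h; simp [pvFold, pvMultiCells, pvEndQ, pvEndR]
  | cons d ds ih =>
    intro pos q r h
    obtain ⟨dq, dr⟩ := d
    have h1 : (pos.length : Int) + n ≤ index + 1 := by
      simp at h; push_cast at h; nlinarith [Int.natCast_nonneg (n * ds.length)]
    have h2 : ((pos ++ pvLegCells q r dq dr n).length : Int) + n * ds.length ≤ index + 1 := by
      simp [pvLegCells_length] at h ⊢; push_cast at h ⊢; nlinarith
    simp only [pvFold, List.foldl_cons, pvLeg_full index dq dr n pos q r h1]
    have := ih (pos ++ pvLegCells q r dq dr n) (q + n * dq) (r + n * dr) h2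
    simp only [pvFold] at this
    simp [this, pvMultiCells, pvEndQ, pvEndR, List.append_assoc]

theorem pvFold_partial (index : Int) (n : Nat) (ds : List (Int × Int)) :
    ∀ (pos : List (Int × Int)) (q r : Int), (pos.length : Int) ≤ index + 1 →
    ∃ q' r', pvFold index n ds (pos, q, r) =
      (pos ++ (pvMultiCells q r n ds).take ((index + 1 - pos.length).toNat), q', r') := by
  induction ds with
  | nil => intro pos q r h; exact ⟨q, r, by simp [pvFold, pvMultiCells]⟩
  | cons d ds ih =>
    intro pos q r h
    obtain ⟨dq, dr⟩ := d
    set t : Nat := (index + 1 - (pos.length : Int)).toNat with hts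
    by_cases hfull : (pos.length : Int) + n ≤ index + 1
    · -- the first leg is fully consumed
      have hn : n ≤ t := by omega
      have hlen2 : ((pos ++ pvLegCells q r dq dr n).length : Int) ≤ index + 1 := by
        simp [pvLegCells_length]; push_cast; omega
      obtain ⟨q', r', hrec⟩ := ih (pos ++ pvLegCells q r dq dr n) (q + n * dq) (r + n * dr) hlen2
      refine ⟨q', r', ?_⟩
      simp only [pvFold, List.foldl_cons, pvLeg_full index dq dr n pos q r hfull]
      simp only [pvFold] at hrec
      rw [hrec]
      have ht2 : ((index + 1 - ((pos ++ pvLegCells q r dq dr n).length : Int)).toNat) = t - n := by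
        simp [pvLegCells_length]; omega
      have hfullleg : (pvLegCells q r dq dr n).length ≤ t := by
        rw [pvLegCells_length]; omega
      rw [ht2]
      simp only [pvMultiCells]
      rw [List.take_append, List.take_of_length_le hfullleg, pvLegCells_length, List.append_assoc]
    · -- the first leg is truncated; everything after it is a no-op
      have htn : t < n := by omega
      obtain ⟨q1, r1, hleg⟩ := pvLeg_partial index dq dr n pos q r h
      refine ⟨q1, r1, ?_⟩
      have hstop : (((pos ++ (pvLegCells q r dq dr n).take t).length : Int)) > index := by
        simp [List.length_take, pvLegCells_length]; omega
      simp only [pvFold, List.foldl_cons, hleg, ← hts]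
      have := pvFold_stuck index n ds (pos ++ (pvLegCells q r dq dr n).take t) q1 r1 hstop
      simp only [pvFold] at this
      rw [this]
      simp only [pvMultiCells]
      rw [List.take_append]
      have : t - (pvLegCells q r dq dr n).length = 0 := by rw [pvLegCells_length]; omega
      simp [this]

theorem pvEndQ_dirs (q : Int) (n : Nat) : pvEndQ q n pvDirections = q := by
  simp [pvEndQ, pvDirections]; try ring

theorem pvEndR_dirs (r : Int) (n : Nat) : pvEndR r n pvDirections = r := by
  simp [pvEndR, pvDirections]; try ring

theorem pvLoop_main (index : Int) (h0 : 0 ≤ index) :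
    ∀ (fuel : Nat) (k : Int) (pos : List (Int × Int)), 1 ≤ k →
    (pos.length : Int) ≤ index + 1 → (fuel : Int) ≥ index + 1 - pos.length →
    pvLoop index fuel (pos, k, 0, k) = (pos ++ pvRings k fuel).take (index.toNat + 1) := by
  intro fuel
  induction fuel with
  | zero =>
    intro k pos hk hlen hfuel
    have h : pos.length = index.toNat + 1 := by omega
    simp [pvLoop, ← h, List.take_left]
  | succ f ih =>
    intro k pos hk hlen hfuel
    by_cases hle : (pos.length : Int) ≤ index
    · by_cases hfull : (pos.length : Int) + 6 * k.toNat ≤ index + 1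
      · have hsw : pvSweep index k (pos, k, 0) = (pos ++ pvRing k, k, 0) := by
          have := pvFold_full index k.toNat pvDirections pos k 0
            (by simp [pvDirections]; omega)
          simp only [pvFold] at this
          simp [pvSweep, this, pvRing, pvEndQ_dirs, pvEndR_dirs]
        have hd : pvLoop index (f + 1) (pos, k, 0, k)
            = pvLoop index f (pos ++ pvRing k, k + 1, 0, k + 1) := by
          simp [pvLoop, hle, hsw]
        have hlen' : (((pos ++ pvRing k).length : Int)) ≤ index + 1 := by
          simp [pvRing_length]; push_cast; omega
        have hk6 : (1 : Int) ≤ 6 * k.toNat := by omega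
        rw [hd, ih (k + 1) (pos ++ pvRing k) (by omega) hlen'
          (by simp [pvRing_length]; push_cast; omega)]
        simp [pvRings, List.append_assoc]
      · -- the last, truncated ring
        set t : Nat := (index + 1 - (pos.length : Int)).toNat with hts
        obtain ⟨q', r', hsw0⟩ := pvFold_partial index k.toNat pvDirections pos k 0 hlen
        have hsw : pvSweep index k (pos, k, 0) = (pos ++ (pvRing k).take t, q', r') := by
          simp only [pvFold] at hsw0
          simp [pvSweep, hsw0, pvRing, ← hts]
        have htle : t ≤ 6 * k.toNat := by
          have := pvRing_length k; omega
        have hlen_take : ((pvRing k).take t).length = t := by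
          rw [List.length_take, pvRing_length]; omega
        have hstop : (((pos ++ (pvRing k).take t).length : Int)) > index := by
          simp [List.length_append, hlen_take]; omega
        have hd : pvLoop index (f + 1) (pos, k, 0, k)
            = pvLoop index f (pos ++ (pvRing k).take t, q' + 1, r', k + 1) := by
          simp [pvLoop, hle, hsw]
        rw [hd, pvLoop_stuck index f _ _ _ _ hstop]
        have hidx : index.toNat + 1 = pos.length + t := by omega
        rw [hidx]
        simp only [pvRings]
        rw [List.take_append, List.take_of_length_le (Nat.le_add_right _ _)]
        have h1 : pos.length + t - pos.length = t := by omega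
        rw [h1, List.take_append]
        have h2 : t - (pvRing k).length = 0 := by rw [pvRing_length]; omega
        rw [h2]
        simp
    · have h : pos.length = index.toNat + 1 := by omega
      simp [pvLoop, hle, ← h, List.take_left]

theorem pvRings_get (m : Nat) : ∀ (k K : Int) (j : Nat), 1 ≤ k → k ≤ K → K < k + m →
    j < 6 * K.toNat →
    (pvRings k m)[(3*K*(K-1) - 3*k*(k-1)).toNat + j]? = (pvRing K)[j]? := by
  induction m with
  | zero => intro k K j _ h1 h2 _; omega
  | succ m ih =>
    intro k K j hk hkK hKm hj
    by_cases he : K = k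
    · subst he
      have h0 : (3*K*(K-1) - 3*K*(K-1)).toNat = 0 := by omega
      rw [h0]
      simp only [pvRings, Nat.zero_add]
      rw [List.getElem?_append_left (by rw [pvRing_length]; omega)]
    · have hlt : k + 1 ≤ K := by omega
      have hdiff : 3*K*(K-1) - 3*k*(k-1) ≥ 6*k := by nlinarith
      have hB : 3*(k+1)*((k+1)-1) = 3*k*(k-1) + 6*k := by ring
      have hk0 : (0:Int) ≤ 3*k*(k-1) := by nlinarith
      have hidx : (3*K*(K-1) - 3*k*(k-1)).toNat + j
          = (pvRing k).length + ((3*K*(K-1) - 3*(k+1)*((k+1)-1)).toNat + j) := by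
        rw [pvRing_length, hB]; omega
      simp only [pvRings]
      rw [hidx, List.getElem?_append_right (by omega)]
      have h1 : (pvRing k).length + ((3*K*(K-1) - 3*(k+1)*((k+1)-1)).toNat + j) - (pvRing k).length
          = (3*K*(K-1) - 3*(k+1)*((k+1)-1)).toNat + j := by omega
      rw [h1]
      exact ih (k+1) K j (by omega) hlt (by omega) hj

-- the cell of ring K at offset j, exactly as B's table lookup computes it
theorem pvLeg_get_right (q r dq dr : Int) (n : Nat) (rest : List (Int × Int)) (i : Nat) :
    (pvLegCells q r dq dr n ++ rest)[n + i]? = rest[i]? := by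
  rw [List.getElem?_append_right (by rw [pvLegCells_length]; omega)]
  congr 1
  rw [pvLegCells_length]; omega

theorem pvLeg_get_left (q r dq dr : Int) (n : Nat) (rest : List (Int × Int)) (i : Nat)
    (h : i < n) :
    (pvLegCells q r dq dr n ++ rest)[i]? = some (q + i * dq, r + i * dr) := by
  rw [List.getElem?_append_left (by rw [pvLegCells_length]; omega), pvLegCells_get _ _ _ _ _ _ h]

theorem pvRing_get (K j : Int) (hK : 1 ≤ K) (hj : 0 ≤ j) (hj6 : j < 6 * K) :
    ∃ cq cr dqv drv,
      PySem.List.pyGet? pvCQ (PySem.Int.floordiv j K) = some cq ∧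
      PySem.List.pyGet? pvCR (PySem.Int.floordiv j K) = some cr ∧
      PySem.List.pyGet? pvDQ (PySem.Int.floordiv j K) = some dqv ∧
      PySem.List.pyGet? pvDR (PySem.Int.floordiv j K) = some drv ∧
      (pvRing K)[j.toNat]? = some (K + K * cq + (PySem.Int.mod j K) * dqv,
                                   K * cr + (PySem.Int.mod j K) * drv) := by
  have hK0 : (0:Int) < K := by omega
  set l : Int := PySem.Int.floordiv j K with hl
  set s : Int := PySem.Int.mod j K with hsdef
  have hmul : l * K + s = j := PySem.Int.floordiv_mul_add_mod j K
  have hbr : l * K ≤ j ∧ j < (l + 1) * K := (PySem.Int.floordiv_eq_iff_of_pos hK0).mp hl.symm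
  have hs0 : 0 ≤ s := by nlinarith [hbr.1]
  have hsK : s < K := by nlinarith [hbr.2]
  have hl0 : 0 ≤ l := by nlinarith [hbr.2]
  have hl6 : l < 6 := by nlinarith [hbr.1]
  clear_value l s
  clear hl hsdef
  have hn : ((K.toNat : Int)) = K := Int.toNat_of_nonneg (by omega)
  set n : Nat := K.toNat with hndef
  have hsn : ((s.toNat : Int)) = s := Int.toNat_of_nonneg hs0
  have hsnn : s.toNat < n := by omega
  simp only [pvRing, pvMultiCells, pvDirections, List.append_nil, ← hndef]
  interval_cases l
  · refine ⟨0, 0, 0, -1, by decide, by decide, by decide, by decide, ?_⟩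
    have hjt : j.toNat = s.toNat := by omega
    rw [hjt, pvLeg_get_left _ _ _ _ _ _ _ hsnn]
    simp only [Option.some.injEq, Prod.mk.injEq]
    constructor <;> omega
  · refine ⟨0, -1, -1, 0, by decide, by decide, by decide, by decide, ?_⟩
    have hjt : j.toNat = n + s.toNat := by omega
    rw [hjt, pvLeg_get_right, pvLeg_get_left _ _ _ _ _ _ _ hsnn]
    simp only [Option.some.injEq, Prod.mk.injEq]
    constructor <;> push_cast <;> omega
  · refine ⟨-1, -1, -1, 1, by decide, by decide, by decide, by decide, ?_⟩
    have hjt : j.toNat = n + (n + s.toNat) := by omega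
    rw [hjt, pvLeg_get_right, pvLeg_get_right, pvLeg_get_left _ _ _ _ _ _ _ hsnn]
    simp only [Option.some.injEq, Prod.mk.injEq]
    constructor <;> push_cast <;> omega
  · refine ⟨-2, 0, 0, 1, by decide, by decide, by decide, by decide, ?_⟩
    have hjt : j.toNat = n + (n + (n + s.toNat)) := by omega
    rw [hjt, pvLeg_get_right, pvLeg_get_right, pvLeg_get_right,
        pvLeg_get_left _ _ _ _ _ _ _ hsnn]
    simp only [Option.some.injEq, Prod.mk.injEq]
    constructor <;> push_cast <;> omega
  · refine ⟨-2, 1, 1, 0, by decide, by decide, by decide, by decide, ?_⟩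
    have hjt : j.toNat = n + (n + (n + (n + s.toNat))) := by omega
    rw [hjt, pvLeg_get_right, pvLeg_get_right, pvLeg_get_right, pvLeg_get_right,
        pvLeg_get_left _ _ _ _ _ _ _ hsnn]
    simp only [Option.some.injEq, Prod.mk.injEq]
    constructor <;> push_cast <;> omega
  · refine ⟨-1, 1, 1, -1, by decide, by decide, by decide, by decide, ?_⟩
    have hjt : j.toNat = n + (n + (n + (n + (n + s.toNat)))) := by omega
    rw [hjt, pvLeg_get_right, pvLeg_get_right, pvLeg_get_right, pvLeg_get_right,
        pvLeg_get_right, pvLegCells_get _ _ _ _ _ _ hsnn]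
    simp only [Option.some.injEq, Prod.mk.injEq]
    constructor <;> push_cast <;> omega

theorem pvFindRing_main (index : Int) (h0 : 0 ≤ index) :
    ∀ (fuel : Nat) (k : Int), 1 ≤ k → 3*k*(k-1) ≤ index → (fuel : Int) ≥ index + 1 - k →
    1 ≤ pvFindRing index fuel k ∧ 3*(pvFindRing index fuel k)*((pvFindRing index fuel k)-1) ≤ index ∧
      index < 3*(pvFindRing index fuel k)*((pvFindRing index fuel k)+1) := by
  intro fuel
  induction fuel with
  | zero =>
    intro k hk hlo hfuel
    have hki : index + 1 ≤ k := by omega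
    refine ⟨hk, hlo, ?_⟩
    simp only [pvFindRing]
    nlinarith
  | succ f ih =>
    intro k hk hlo hfuel
    by_cases hc : 3 * k * (k + 1) ≤ index
    · have := ih (k + 1) (by omega) (by nlinarith) (by push_cast at hfuel ⊢; omega)
      simpa [pvFindRing, hc] using this
    · refine ⟨?_, ?_, ?_⟩ <;> simp [pvFindRing, hc] <;> omega
  
-- ===== VERDICT (by name: the statement is the Claim_ definition above) =====
theorem spiral_next_py_spec : Claim_equal_spiral_next_py := by
  intro index _ hpre
  have hpre' : (0:Int) ≤ index := hpre
  unfold Spec_spiral_next_py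
  by_cases h0 : index = 0
  · subst h0; decide
  · -- B's ring search brackets the index: 3K(K-1) ≤ index < 3K(K+1)
    have h1 : (1:Int) ≤ index := by omega
    obtain ⟨hK1, hlo, hhi⟩ := pvFindRing_main index hpre' (index.toNat + 1) 1
      (by norm_num) (by omega) (by push_cast; omega)
    set K : Int := pvFindRing index (index.toNat + 1) 1 with hKdef
    obtain ⟨A, hAdef⟩ : ∃ A, A = 3 * K * (K - 1) := ⟨_, rfl⟩
    have hA0 : (0:Int) ≤ A := by rw [hAdef]; nlinarith
    have hAK : K - 1 ≤ A := by rw [hAdef]; nlinarith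
    have hlo' : A ≤ index := by rw [hAdef]; exact hlo
    have hhi' : index < A + 6 * K := by
      have he : 3 * K * (K + 1) = 3 * K * (K - 1) + 6 * K := by ring
      rw [hAdef]; linarith [hhi]
    set j : Int := index - 3 * K * (K - 1) with hjdef
    have hjA : j = index - A := by rw [hjdef, hAdef]
    have hj0 : (0:Int) ≤ j := by omega
    have hj6 : j < 6 * K := by omega
    obtain ⟨cq, cr, dqv, drv, hcq, hcr, hdq, hdr, hcell⟩ := pvRing_get K j hK1 hj0 hj6
    -- A's loop builds the first index+1 spiral cells
    have hloop := pvLoop_main index hpre' (index.toNat + 1) 1 []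
      (by norm_num) (by simp; try omega) (by simp)
    have hKlt : K < 1 + ((index.toNat + 1 : Nat) : Int) := by push_cast; omega
    have hjn6 : j.toNat < 6 * K.toNat := by omega
    have hoff : (3*K*(K-1) - 3*1*(1-1)).toNat + j.toNat = index.toNat := by
      rw [← hAdef]; omega
    have hget := pvRings_get (index.toNat + 1) 1 K j.toNat (by norm_num) hK1 hKlt hjn6
    rw [hoff] at hget
    have hfinal : PySem.List.pyGet?
        (List.take (index.toNat + 1) (pvRings 1 (index.toNat + 1))) index
        = some (K + K * cq + (PySem.Int.mod j K) * dqv,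
                K * cr + (PySem.Int.mod j K) * drv) := by
      rw [PySem.List.pyGet?_of_nonneg _ hpre', List.getElem?_take_of_lt (by omega),
          hget, hcell]
    simp only [spiral_next_py, if_neg h0, hloop, List.nil_append, hfinal,
      spiral_next_py_alt, ← hKdef, ← hjdef, hcq, hcr, hdq, hdr]
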